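-- pv_equiv track=rewrite | github.com/alexgarma/programming-expert | programming-fundamentals/longest_unique_words.py | get_n_longest_unique_words
-- ===== SOURCE A (Python) =====
-- def get_n_longest_unique_words(words, n):
--
--     counts = {
--
--     }
--
--     for word in words:
--         counts[word] = counts.get(word,0) + 1
--     unique_words_dict = counts.copy()
--     for key, value in counts.items():
--         if value > 1:
--             del unique_words_dict[key]
--         else:
--             continue
--
--     unique_words_lst = list(unique_words_dict.keys())
--     unique_words_with_lengths = {}
--
--     for word in unique_words_lst:
--         unique_words_with_lengths[word] = len(word)
--     top_n_words = sorted(unique_words_with_lengths,key = unique_words_with_lengths.get,reverse = True)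
--     top_n_words = top_n_words[:n]
--
--     return top_n_words
-- ===== SOURCE B (Python) =====
-- def get_n_longest_unique_words(words, n):
--     counts = {}
--     for w in words:
--         counts[w] = counts.get(w, 0) + 1
--     uniques = [w for w, c in counts.items() if c == 1]
--     buckets = {}
--     for w in uniques:
--         buckets.setdefault(len(w), []).append(w)
--     result = []
--     if buckets:
--         for length in range(max(buckets), -1, -1):
--             result.extend(buckets.get(length, []))
--     return result[:n]
-- ===== Notes on version B (the rewrite author's own statement) =====
-- stated objective: alternative
-- what changed: Replaces A's comparison sort of the unique words (sorted with key=lengths-dict.get, reverse=True) by a bucket pass: group unique words by length in a dict and read the buckets out from the maximum length down to 0, which reproduces the length-descending, first-appearance-stable order without sorting.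
import Mathlib
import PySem

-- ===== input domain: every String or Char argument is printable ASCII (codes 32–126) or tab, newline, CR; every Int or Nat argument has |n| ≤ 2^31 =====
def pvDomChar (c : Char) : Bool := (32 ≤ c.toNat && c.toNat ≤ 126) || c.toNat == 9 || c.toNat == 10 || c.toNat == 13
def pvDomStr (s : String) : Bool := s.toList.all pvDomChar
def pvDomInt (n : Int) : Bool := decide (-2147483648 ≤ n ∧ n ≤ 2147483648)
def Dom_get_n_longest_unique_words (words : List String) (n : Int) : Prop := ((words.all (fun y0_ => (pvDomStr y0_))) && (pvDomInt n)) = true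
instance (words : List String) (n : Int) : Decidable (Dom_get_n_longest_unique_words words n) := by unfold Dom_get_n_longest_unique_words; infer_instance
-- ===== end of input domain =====

-- B replaces A's sorted(..., key=dict.get, reverse=True) by a length-bucket pass read out from max length down; same return value, proved equivalent (objective: alternative).

-- ===== PORT A =====
def get_n_longest_unique_words (words : List String) (n : Int) : List String :=
  -- counts = {}; for word in words: counts[word] = counts.get(word,0) + 1
  let counts : PySem.Dict String Int :=
    words.foldl (fun d w => d.insert w (d.getD w 0 + 1)) PySem.Dict.empty
  -- unique_words_dict = counts.copy(); for key, value in counts.items(): if value > 1: del unique_words_dict[key]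
  let unique_words_dict : PySem.Dict String Int :=
    counts.items.foldl (fun d p => if 1 < p.2 then d.erase p.1 else d) counts
  -- unique_words_lst = list(unique_words_dict.keys())
  let unique_words_lst : List String := unique_words_dict.keys
  -- unique_words_with_lengths = {}; for word in unique_words_lst: unique_words_with_lengths[word] = len(word)
  let unique_words_with_lengths : PySem.Dict String Int :=
    unique_words_lst.foldl (fun d w => d.insert w (PySem.Str.len w)) PySem.Dict.empty
  -- sorted(unique_words_with_lengths, key=unique_words_with_lengths.get, reverse=True): sorts the dict's
  -- keys; .get is ported totally with default 0 — exact here, since every sorted element is a key of the dict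
  let top_n_words : List String :=
    PySem.List.sorted unique_words_with_lengths.keys
      (fun w => unique_words_with_lengths.getD w 0) true
  -- top_n_words[:n]
  PySem.List.slice top_n_words none (some n)

-- ===== PORT B =====
def get_n_longest_unique_words_alt (words : List String) (n : Int) : List String :=
  -- counts = {}; for w in words: counts[w] = counts.get(w, 0) + 1
  let counts : PySem.Dict String Int :=
    words.foldl (fun d w => d.insert w (d.getD w 0 + 1)) PySem.Dict.empty
  -- uniques = [w for w, c in counts.items() if c == 1]
  let uniques : List String := (counts.items.filter (fun p => p.2 == 1)).map (fun p => p.1)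
  -- buckets = {}; for w in uniques: buckets.setdefault(len(w), []).append(w)  (append in place = modify with l ++ [w])
  let buckets : PySem.Dict Int (List String) :=
    uniques.foldl (fun d w => d.modify (PySem.Str.len w) [] (fun l => l ++ [w])) PySem.Dict.empty
  -- result = []; if buckets: for length in range(max(buckets), -1, -1): result.extend(buckets.get(length, []))
  let result : List String :=
    match PySem.List.max? buckets.keys (fun x => x) with
    | none => []
    | some m => (PySem.List.pyRange m (-1) (-1)).foldl (fun acc L => acc ++ buckets.getD L []) []
  -- result[:n]
  PySem.List.slice result none (some n)

-- ===== PRECONDITION & SPEC =====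
def Spec_get_n_longest_unique_words (words : List String) (n : Int) (out : List String) : Prop := out = get_n_longest_unique_words_alt words n
instance (words : List String) (n : Int) (out : List String) : Decidable (Spec_get_n_longest_unique_words words n out) := by unfold Spec_get_n_longest_unique_words; infer_instance

-- ===== CLAIM (what is proved, stated in full; the proofs are below) =====
def Claim_equal_get_n_longest_unique_words : Prop := ∀ (words : List String) (n : Int), Dom_get_n_longest_unique_words words n → Spec_get_n_longest_unique_words words n (get_n_longest_unique_words words n)

-- ===== LEMMAS AND PROOFS =====
theorem pv_insertBy_append {α : Type} (before : α → α → Bool) (x : α) (l1 l2 : List α)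
    (h : ∀ y ∈ l1, before x y = false) :
    PySem.List.insertBy before x (l1 ++ l2) = l1 ++ PySem.List.insertBy before x l2 := by
  induction l1 with
  | nil => simp
  | cons a l ih =>
    simp only [List.cons_append, PySem.List.insertBy]
    rw [h a (by simp)]
    simp only [Bool.false_eq_true, if_false]
    rw [ih (fun y hy => h y (by simp [hy]))]
theorem pv_insertBy_front {α : Type} (before : α → α → Bool) (x : α) (l : List α)
    (h : ∀ y ∈ l, before x y = true) :
    PySem.List.insertBy before x l = x :: l := by
  cases l with
  | nil => rfl
  | cons a l => simp only [PySem.List.insertBy]; rw [h a (by simp)]; simp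

theorem pv_insertBy_flatMap (x : String) (D : List Int) (f : Int → List String)
    (hD : D.Pairwise (fun a b => b < a)) (hx : PySem.Str.len x ∈ D)
    (hf : ∀ L ∈ D, ∀ y ∈ f L, PySem.Str.len y = L) :
    PySem.List.insertBy (fun a b => decide (PySem.Str.len b < PySem.Str.len a)) x (D.flatMap f)
      = D.flatMap (fun L => if L = PySem.Str.len x then f L ++ [x] else f L) := by
  induction D with
  | nil => simp at hx
  | cons d D ih =>
    rcases List.pairwise_cons.mp hD with ⟨hd, hD'⟩
    simp only [List.flatMap_cons]
    by_cases hdx : d = PySem.Str.len x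
    · -- x belongs to the first bucket; everything after it has a strictly smaller key
      rw [pv_insertBy_append _ _ _ _ (fun y hy => by
        simp only [decide_eq_false_iff_not, not_lt]
        rw [hf d (by simp) y hy, hdx])]
      rw [pv_insertBy_front _ _ _ (fun y hy => by
        rcases List.mem_flatMap.mp hy with ⟨L, hL, hyL⟩
        simp only [decide_eq_true_eq]
        rw [hf L (by simp [hL]) y hyL, ← hdx]
        exact hd L hL)]
      rw [if_pos hdx]
      have hrest : (D.flatMap (fun L => if L = PySem.Str.len x then f L ++ [x] else f L))
          = D.flatMap f := by
        apply List.flatMap_congr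
        intro L hL
        rw [if_neg (by rw [← hdx]; exact ne_of_lt (hd L hL))]
      rw [hrest]
      simp
    · -- x goes past the first bucket (its elements have key d > len x)
      have hxD : PySem.Str.len x ∈ D := by
        rcases List.mem_cons.mp hx with h | h
        · exact (hdx h.symm).elim
        · exact h
      have hdgt : PySem.Str.len x < d := hd _ hxD
      rw [pv_insertBy_append _ _ _ _ (fun y hy => by
        simp only [decide_eq_false_iff_not, not_lt]
        rw [hf d (by simp) y hy]
        exact le_of_lt hdgt)]
      rw [ih hD' hxD (fun L hL => hf L (by simp [hL]))]
      rw [if_neg hdx]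

theorem pv_sorted_len_eq_flatMap (uw : List String) (m : Int)
    (hb : ∀ w ∈ uw, PySem.Str.len w ≤ m) :
    PySem.List.sorted uw PySem.Str.len true
      = (PySem.List.pyRange m (-1) (-1)).flatMap
          (fun L => uw.filter (fun w => PySem.Str.len w == L)) := by
  induction uw using List.reverseRecOn with
  | nil => simp [PySem.List.sorted]
  | append_singleton ys x ih =>
    have hys : ∀ w ∈ ys, PySem.Str.len w ≤ m := fun w hw => hb w (by simp [hw])
    rw [PySem.List.sorted_rev_eq_foldl_insertBy, List.foldl_append, List.foldl_cons,
      List.foldl_nil, ← PySem.List.sorted_rev_eq_foldl_insertBy, ih hys]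
    rw [pv_insertBy_flatMap x _ _
      (by
        rw [PySem.List.pyRange_neg_one_eq_reverse]
        rw [List.pairwise_reverse]
        exact PySem.List.pairwise_lt_pyRange_one _ _)
      (by
        rw [PySem.List.mem_pyRange_neg_one]
        constructor
        · have := PySem.Str.len_eq x; omega
        · exact hb x (by simp))
      (by
        intro L hL y hy
        have := List.of_mem_filter hy
        simpa using this)]
    apply List.flatMap_congr
    intro L hL
    rw [List.filter_append]
    by_cases hLx : L = PySem.Str.len x
    · rw [if_pos hLx]
      simp [hLx]
    · rw [if_neg hLx]
      have hz : (PySem.Str.len x == L) = false := by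
        rw [beq_eq_false_iff_ne]; exact fun h => hLx h.symm
      simp only [List.filter_cons, hz, List.filter_nil]
      simp

theorem pv_insertBy_congr (k1 k2 : String → Int) (x : String) (acc : List String)
    (hx : k1 x = k2 x) (hacc : ∀ y ∈ acc, k1 y = k2 y) :
    PySem.List.insertBy (fun a b => decide (k1 b < k1 a)) x acc
      = PySem.List.insertBy (fun a b => decide (k2 b < k2 a)) x acc := by
  induction acc with
  | nil => rfl
  | cons a l ih =>
    have e1 : (k1 a < k1 x) = (k2 a < k2 x) := by rw [hx, hacc a (by simp)]
    simp only [PySem.List.insertBy, e1]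
    split_ifs with h
    · rfl
    · exact congrArg (a :: ·) (ih (fun y hy => hacc y (by simp [hy])))

theorem pv_sorted_congr (uw : List String) (k1 k2 : String → Int)
    (h : ∀ w ∈ uw, k1 w = k2 w) :
    PySem.List.sorted uw k1 true = PySem.List.sorted uw k2 true := by
  rw [PySem.List.sorted_rev_eq_foldl_insertBy, PySem.List.sorted_rev_eq_foldl_insertBy]
  have main : ∀ (l acc : List String), (∀ w ∈ l, k1 w = k2 w) → (∀ w ∈ acc, k1 w = k2 w) →
      l.foldl (fun acc x => PySem.List.insertBy (fun a b => decide (k1 b < k1 a)) x acc) acc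
        = l.foldl (fun acc x => PySem.List.insertBy (fun a b => decide (k2 b < k2 a)) x acc) acc := by
    intro l
    induction l with
    | nil => intro acc _ _; rfl
    | cons x l ih =>
      intro acc hl hacc
      simp only [List.foldl_cons]
      rw [pv_insertBy_congr k1 k2 x acc (hl x (by simp)) hacc]
      have hacc' : ∀ w ∈ PySem.List.insertBy (fun a b => decide (k2 b < k2 a)) x acc,
          k1 w = k2 w := by
        intro w hw
        rcases (PySem.List.mem_insertBy (fun a b => decide (k2 b < k2 a)) x w acc).mp hw with h' | h'
        · exact h' ▸ hl x (by simp)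
        · exact hacc w h'
      have hl' : ∀ w ∈ l, k1 w = k2 w := fun w hw => hl w (List.mem_cons_of_mem _ hw)
      exact ih _ hl' hacc'
  exact main uw [] h (by simp)

theorem pv_erase_fold_items (m : List (String × Int)) (d : PySem.Dict String Int) :
    (m.foldl (fun d p => if 1 < p.2 then d.erase p.1 else d) d).items
      = d.items.filter (fun q => !(((m.filter (fun p => 1 < p.2)).map (fun p => p.1)).contains q.1)) := by
  induction m generalizing d with
  | nil => simp
  | cons p m ih =>
    simp only [List.foldl_cons, List.filter_cons]
    by_cases hp : 1 < p.2
    · rw [if_pos hp, if_pos (by exact decide_eq_true hp)]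
      rw [ih]
      show (PySem.Dict.erase d p.1).items.filter _ = _
      have herase : (PySem.Dict.erase d p.1).items = d.items.filter (fun q => !(q.1 == p.1)) := rfl
      rw [herase, List.filter_filter]
      apply List.filter_congr
      intro q _
      simp only [List.map_cons, List.contains_cons]
      cases hq : (q.1 == p.1) <;> simp
    · rw [if_neg hp, if_neg (by simpa using hp)]
      exact ih d

-- core: on any duplicate-free list of words, A's sort equals B's bucket readout
theorem pv_core (uw : List String) (hnd : uw.Nodup) (n : Int) :
    PySem.List.slice
      (PySem.List.sorted
        (uw.foldl (fun d w => d.insert w (PySem.Str.len w)) PySem.Dict.empty).keys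
        (fun w => (uw.foldl (fun d w => d.insert w (PySem.Str.len w)) PySem.Dict.empty).getD w 0)
        true) none (some n)
    = PySem.List.slice
      (match
        PySem.List.max?
          (uw.foldl (fun d w => d.modify (PySem.Str.len w) [] fun l => l ++ [w]) PySem.Dict.empty).keys
          (fun x => x) with
      | none => []
      | some m =>
        List.foldl (fun acc L => acc ++
            (uw.foldl (fun d w => d.modify (PySem.Str.len w) [] fun l => l ++ [w]) PySem.Dict.empty).getD L [])
          [] (PySem.List.pyRange m (-1) (-1))) none (some n) := by
  have hitems : (uw.foldl (fun d w => d.insert w (PySem.Str.len w)) PySem.Dict.empty).items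
      = uw.map (fun w => (w, PySem.Str.len w)) := by
    rw [PySem.Dict.items_foldl_insert_fresh uw (fun w => w) (fun w => PySem.Str.len w)
      PySem.Dict.empty (fun a _ => PySem.Dict.contains_empty a) (by simpa using hnd)]
    rfl
  have hkeys : (uw.foldl (fun d w => d.insert w (PySem.Str.len w)) PySem.Dict.empty).keys = uw := by
    show (uw.foldl (fun d w => d.insert w (PySem.Str.len w)) PySem.Dict.empty).items.map (fun p => p.1) = uw
    rw [hitems, List.map_map]
    simp [Function.comp_def]
  have hget : ∀ w ∈ uw,
      (uw.foldl (fun d w => d.insert w (PySem.Str.len w)) PySem.Dict.empty).getD w 0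
        = PySem.Str.len w := by
    intro w hw
    exact PySem.Dict.getD_of_mem_items _ (by rw [hitems]; exact List.mem_map_of_mem hw)
      (by rw [hkeys]; exact hnd) 0
  have hbget : ∀ L : Int,
      (uw.foldl (fun d w => d.modify (PySem.Str.len w) [] fun l => l ++ [w]) PySem.Dict.empty).getD L []
        = uw.filter (fun w => PySem.Str.len w == L) := by
    intro L
    rw [show (uw.foldl (fun d w => d.modify (PySem.Str.len w) [] fun l => l ++ [w]) PySem.Dict.empty)
        = ((uw.map (fun w => (PySem.Str.len w, w))).foldl
            (fun d p => d.modify p.1 [] fun l => l ++ [p.2]) PySem.Dict.empty) from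
      (List.foldl_map (f := fun w => (PySem.Str.len w, w))
        (g := fun d p => d.modify p.1 [] fun l => l ++ [p.2])
        (l := uw) (init := PySem.Dict.empty)).symm]
    rw [PySem.Dict.getD_foldl_modify_append]
    simp only [PySem.Dict.getD_empty, List.nil_append, List.filter_map, List.map_map,
      Function.comp_def, List.map_id_fun', id]
  have hbkeys : (uw.foldl (fun d w => d.modify (PySem.Str.len w) [] fun l => l ++ [w])
      PySem.Dict.empty).keys = PySem.Set.ofList (uw.map PySem.Str.len) := by
    rw [PySem.Dict.keys_foldl_modify_key uw PySem.Str.len [] (fun _ w l => l ++ [w]) PySem.Dict.empty]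
    rfl
  rw [hkeys, pv_sorted_congr uw _ PySem.Str.len hget, hbkeys]
  by_cases huw : uw = []
  · subst huw
    rfl
  · obtain ⟨w0, hw0⟩ := List.exists_mem_of_ne_nil uw huw
    have hkmem : ∀ w ∈ uw, PySem.Str.len w ∈ PySem.Set.ofList (uw.map PySem.Str.len) := by
      intro w hw
      exact (PySem.Set.mem_ofList _ _).mpr (List.mem_map_of_mem hw)
    cases hm : PySem.List.max? (PySem.Set.ofList (uw.map PySem.Str.len)) (fun x => x) with
    | none =>
      exfalso
      have : PySem.Set.ofList (uw.map PySem.Str.len) = [] :=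
        (PySem.List.max?_eq_none_iff _ _).mp hm
      rw [this] at hkmem
      exact absurd (hkmem w0 hw0) (List.not_mem_nil)
    | some mv =>
      have hmax : ∀ w ∈ uw, PySem.Str.len w ≤ mv := by
        intro w hw
        exact PySem.List.max?_isMax hm _ (hkmem w hw)
      simp only [hbget]
      rw [PySem.List.foldl_append_eq_flatMap
        (fun L => uw.filter (fun w => PySem.Str.len w == L)) (PySem.List.pyRange mv (-1) (-1)) []]
      rw [List.nil_append]
      rw [← pv_sorted_len_eq_flatMap uw mv hmax]

-- main assembly
theorem pv_main (words : List String) (n : Int) :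
    get_n_longest_unique_words words n = get_n_longest_unique_words_alt words n := by
  simp only [get_n_longest_unique_words, get_n_longest_unique_words_alt,
    PySem.Dict.foldl_insert_getD_add_one_eq_counter]
  have hA_uw : (List.foldl (fun d p => if 1 < p.2 then d.erase p.1 else d) (PySem.Dict.counter words)
        (PySem.Dict.counter words).items).keys
      = (PySem.Set.ofList words).filter (fun k => ((List.count k words : Int) == 1)) := by
    show (List.foldl (fun d p => if 1 < p.2 then d.erase p.1 else d) (PySem.Dict.counter words)
        (PySem.Dict.counter words).items).items.map (fun p => p.1) = _
    rw [pv_erase_fold_items]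
    simp only [PySem.Dict.items_counter, List.filter_map, List.map_map, Function.comp_def,
      List.map_id_fun', id]
    apply List.filter_congr
    intro k hk
    have hk1 : 1 ≤ List.count k words := by
      have := (PySem.Set.mem_ofList words k).mp hk
      exact List.count_pos_iff.mpr this
    by_cases hc : 1 < (List.count k words : Int)
    · have hmem : k ∈ (PySem.Set.ofList words).filter
          (fun x => decide (1 < (List.count x words : Int))) :=
        List.mem_filter.mpr ⟨hk, by simpa using hc⟩
      have : ((PySem.Set.ofList words).filter
          (fun x => decide (1 < (List.count x words : Int)))).contains k = true :=
        List.contains_iff_mem.mpr hmem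
      rw [this]
      have : ((List.count k words : Int) == 1) = false := by
        rw [beq_eq_false_iff_ne]; omega
      rw [this]
      rfl
    · have hnmem : k ∉ (PySem.Set.ofList words).filter
          (fun x => decide (1 < (List.count x words : Int))) := by
        intro hmem
        exact hc (by simpa using (List.mem_filter.mp hmem).2)
      have : ((PySem.Set.ofList words).filter
          (fun x => decide (1 < (List.count x words : Int)))).contains k = false := by
        rw [← Bool.not_eq_true]
        intro h
        exact hnmem (List.contains_iff_mem.mp h)
      rw [this]
      have : ((List.count k words : Int) == 1) = true := by
        rw [beq_iff_eq]; omega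
      rw [this]
      rfl
  have hB_uw : ((PySem.Dict.counter words).items.filter (fun p => p.2 == 1)).map (fun p => p.1)
      = (PySem.Set.ofList words).filter (fun k => ((List.count k words : Int) == 1)) := by
    simp only [PySem.Dict.items_counter, List.filter_map, List.map_map, Function.comp_def,
      List.map_id_fun', id]
  rw [hA_uw, hB_uw]
  exact pv_core _ ((PySem.Set.nodup_ofList words).filter _) n

-- ===== VERDICT (by name: the statement is the Claim_ definition above) =====
theorem get_n_longest_unique_words_spec : Claim_equal_get_n_longest_unique_words := by
  intro words n _
  exact pv_main words n
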